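-- pv_equiv track=rewrite | github.com/LYC127/RPG | greedy_search.py | split_list_by_reference
-- ===== SOURCE A (Python) =====
-- def split_list_by_reference(single_list, nested_list, idx):
--     result = []
--     index = 0
--     for sublist in nested_list:
--         length = len(sublist)
--         result.append(single_list[idx][index:index + length])
--         index += length
--     return result
-- ===== SOURCE B (Python) =====
-- def split_list_by_reference(single_list, nested_list, idx):
--     if not nested_list:
--         return []
--
--     def chop(rest, refs):
--         if not refs:
--             return []
--         n = len(refs[0])
--         return [rest[:n]] + chop(rest[n:], refs[1:])
--
--     return chop(single_list[idx], nested_list)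
-- ===== Notes on version B (the rewrite author's own statement) =====
-- stated objective: alternative
-- what changed: A keeps the whole target list and threads a running integer offset through one loop, slicing by absolute indices; B carries no index at all: it recursively peels the target apart, splitting off a prefix of the next reference length and recursing on the shrinking remainder.
import Mathlib
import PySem

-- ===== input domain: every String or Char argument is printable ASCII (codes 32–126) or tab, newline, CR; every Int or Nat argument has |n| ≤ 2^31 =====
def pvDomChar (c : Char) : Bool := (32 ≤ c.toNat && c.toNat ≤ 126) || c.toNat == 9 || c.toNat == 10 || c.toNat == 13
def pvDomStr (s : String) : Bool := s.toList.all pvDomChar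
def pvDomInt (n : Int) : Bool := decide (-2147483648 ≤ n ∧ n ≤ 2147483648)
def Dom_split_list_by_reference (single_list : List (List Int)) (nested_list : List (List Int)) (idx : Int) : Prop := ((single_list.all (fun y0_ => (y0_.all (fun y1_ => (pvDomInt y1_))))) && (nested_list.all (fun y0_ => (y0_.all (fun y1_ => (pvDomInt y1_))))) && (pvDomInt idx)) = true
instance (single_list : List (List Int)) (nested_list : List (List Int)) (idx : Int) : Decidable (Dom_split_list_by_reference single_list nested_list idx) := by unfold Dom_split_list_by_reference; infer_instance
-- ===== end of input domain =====

-- B drops A's running-offset slicing entirely: it recursively peels prefixes off a shrinking remainder (objective: alternative decomposition, same cost).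

-- ===== PORT A =====
-- loop 'for sublist in nested_list' threading (result, index); single_list[idx] via pyGet? (Pre_ excludes the IndexError case)
def split_list_by_reference (single_list : List (List Int)) (nested_list : List (List Int)) (idx : Int) : List (List Int) :=
  (nested_list.foldl
    (fun (st : List (List Int) × Int) sublist =>
      let length : Int := sublist.length
      (st.1 ++ [PySem.List.slice ((PySem.List.pyGet? single_list idx).getD []) (some st.2) (some (st.2 + length))],
       st.2 + length))
    ([], 0)).1

-- ===== PORT B =====
-- inner recursive 'chop': split off the prefix of the next reference length, recurse on the remainder
def pvChop (rest : List Int) (refs : List (List Int)) : List (List Int) :=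
  match refs with
  | [] => []
  | s :: refs' =>
      PySem.List.slice rest none (some (s.length : Int))
        :: pvChop (PySem.List.slice rest (some (s.length : Int)) none) refs'

def split_list_by_reference_alt (single_list : List (List Int)) (nested_list : List (List Int)) (idx : Int) : List (List Int) :=
  if nested_list = [] then []
  else pvChop ((PySem.List.pyGet? single_list idx).getD []) nested_list

-- ===== PRECONDITION & SPEC =====
-- Pre_ excludes exactly the inputs where Python A (and B alike) raises IndexError:
-- nested_list nonempty while idx is not a valid (possibly negative) index into single_list.
def Pre_split_list_by_reference (single_list : List (List Int)) (nested_list : List (List Int)) (idx : Int) : Prop :=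
  nested_list = [] ∨ PySem.Raise.InRange single_list.length idx
instance (single_list : List (List Int)) (nested_list : List (List Int)) (idx : Int) : Decidable (Pre_split_list_by_reference single_list nested_list idx) := by unfold Pre_split_list_by_reference; infer_instance

def pvWitness_split_list_by_reference : List (List Int) × List (List Int) × Int :=
  ([[1, 2, 3, 4, 5]], [[7, 7], [8], [9, 9]], 0)

def Spec_split_list_by_reference (single_list : List (List Int)) (nested_list : List (List Int)) (idx : Int) (out : List (List Int)) : Prop := out = split_list_by_reference_alt single_list nested_list idx
instance (single_list : List (List Int)) (nested_list : List (List Int)) (idx : Int) (out : List (List Int)) : Decidable (Spec_split_list_by_reference single_list nested_list idx out) := by unfold Spec_split_list_by_reference; infer_instance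

-- ===== CLAIM =====
def Claim_equal_split_list_by_reference : Prop := ∀ (single_list : List (List Int)) (nested_list : List (List Int)) (idx : Int), Dom_split_list_by_reference single_list nested_list idx → Pre_split_list_by_reference single_list nested_list idx → Spec_split_list_by_reference single_list nested_list idx (split_list_by_reference single_list nested_list idx)

-- ===== LEMMAS AND PROOFS =====

-- the chunk list A produces, as structural recursion over nested_list from start index i
def pvChunks (t : List Int) (ns : List (List Int)) (i : Int) : List (List Int) :=
  match ns with
  | [] => []
  | s :: ns' => PySem.List.slice t (some i) (some (i + (s.length : Int))) :: pvChunks t ns' (i + (s.length : Int))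

theorem pvFoldA (t : List Int) (ns : List (List Int)) (r : List (List Int)) (i : Int) :
    (ns.foldl
      (fun (st : List (List Int) × Int) sublist =>
        let length : Int := sublist.length
        (st.1 ++ [PySem.List.slice t (some st.2) (some (st.2 + length))], st.2 + length))
      (r, i)).1 = r ++ pvChunks t ns i := by
  induction ns generalizing r i with
  | nil => simp [pvChunks]
  | cons s ns' ih => simp [pvChunks, ih]

theorem pvChunks_eq_chop (t : List Int) (ns : List (List Int)) (i : Nat) :
    pvChunks t ns (i : Int) = pvChop (t.drop i) ns := by
  induction ns generalizing t i with
  | nil => simp [pvChunks, pvChop]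
  | cons s ns' ih =>
    simp only [pvChunks, pvChop]
    rw [PySem.List.slice_natCast_add, PySem.List.slice_to_natCast, PySem.List.slice_from_natCast]
    have h : (((i : Int) + (s.length : Int))) = ((i + s.length : Nat) : Int) := by push_cast; ring
    rw [h, ih, List.drop_drop, Nat.add_comm]

-- ===== VERDICT =====
theorem split_list_by_reference_spec : Claim_equal_split_list_by_reference := by
  intro single_list nested_list idx _ _
  show _ = _
  rw [split_list_by_reference, split_list_by_reference_alt]
  rw [pvFoldA, List.nil_append]
  cases nested_list with
  | nil => simp [pvChunks]
  | cons s ns =>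
    simp only [if_neg (List.cons_ne_nil s ns)]
    have := pvChunks_eq_chop ((PySem.List.pyGet? single_list idx).getD []) (s :: ns) 0
    simpa using this
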